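-- pv_equiv track=rewrite | github.com/Zhenhanyijiu/psi3_github | tpsi_py/psi3_batch.py | get_port_array
-- ===== SOURCE A (Python) =====
-- def get_port_array(n_parties: int, cyc_n: int, is_psi3: bool):
--     port_num = n_parties*(n_parties-1)/2
--     ports_array = [[]]*n_parties
--     offset = 12001
--     if is_psi3:
--         offset = 13001
--     base = offset+n_parties*cyc_n
--     # ports = [x for x in range(base, base+3)]
--     for i in range(n_parties):
--         tmp = [0]*n_parties
--         for j in range(n_parties):
--             if i < j:
--                 tmp[j] = base
--                 base = base+1
--             elif i > j:
--                 tmp[j] = ports_array[j][i]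
--         ports_array[i] = tmp
--     return ports_array
-- ===== SOURCE B (Python) =====
-- def get_port_array(n_parties: int, cyc_n: int, is_psi3: bool):
--     base = (13001 if is_psi3 else 12001) + n_parties * cyc_n
--     # closed-form row-major pair numbering: pairs (a, b) with a < b, row a starts at
--     # base + a*(2*n_parties - a - 1)//2
--     start = [base + a * (2 * n_parties - a - 1) // 2 for a in range(n_parties)]
--     return [[0 if i == j else
--              (start[i] + j - i - 1 if i < j else start[j] + i - j - 1)
--              for j in range(n_parties)]
--             for i in range(n_parties)]
-- ===== Notes on version B (the rewrite author's own statement) =====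
-- stated objective: simpler
-- what changed: A fills the matrix row by row with a running port counter and mirror-reads already-stored cells (ports_array[j][i]); B computes every cell independently from a closed-form row-major pair index, with no counter and no reads of the matrix being built.
import Mathlib
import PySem

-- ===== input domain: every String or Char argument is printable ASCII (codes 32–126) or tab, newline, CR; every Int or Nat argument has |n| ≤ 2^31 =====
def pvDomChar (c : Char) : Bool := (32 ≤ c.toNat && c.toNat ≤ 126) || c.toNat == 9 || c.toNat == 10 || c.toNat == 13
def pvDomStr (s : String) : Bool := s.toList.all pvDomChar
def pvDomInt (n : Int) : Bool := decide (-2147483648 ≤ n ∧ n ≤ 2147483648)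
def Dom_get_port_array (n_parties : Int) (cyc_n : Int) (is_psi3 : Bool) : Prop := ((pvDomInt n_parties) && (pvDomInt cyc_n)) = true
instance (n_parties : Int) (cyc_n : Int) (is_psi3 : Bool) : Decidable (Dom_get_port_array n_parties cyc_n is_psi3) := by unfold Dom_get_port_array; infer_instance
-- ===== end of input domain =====

-- B replaces A's running counter and mirror-reads of the matrix by a closed-form
-- formula for each cell (objective: simpler — each entry is computed independently).

-- ===== PORT A =====
-- Python's `port_num = n_parties*(n_parties-1)/2` is a float and is never used; omitted.
-- All pySetD/pyGetD indices are in range here, so the total forms are exact.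
def get_port_array (n_parties : Int) (cyc_n : Int) (is_psi3 : Bool) : List (List Int) :=
  let offset : Int := if is_psi3 then 13001 else 12001
  let st :=
    (PySem.List.pyRange 0 n_parties 1).foldl
      (fun (st : List (List Int) × Int) (i : Int) =>
        let inner :=
          (PySem.List.pyRange 0 n_parties 1).foldl
            (fun (st2 : List Int × Int) (j : Int) =>
              if i < j then
                (PySem.List.pySetD st2.1 j st2.2, st2.2 + 1)
              else if j < i then
                (PySem.List.pySetD st2.1 j
                  (PySem.List.pyGetD (PySem.List.pyGetD st.1 j []) i 0), st2.2)
              else st2)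
            (PySem.List.pyRepeat [(0 : Int)] n_parties, st.2)
        (PySem.List.pySetD st.1 i inner.1, inner.2))
      (PySem.List.pyRepeat [([] : List Int)] n_parties, offset + n_parties * cyc_n)
  st.1

-- ===== PORT B =====
-- `start[i]`/`start[j]` lookups are always in range, so the total pyGetD is exact.
def get_port_array_alt (n_parties : Int) (cyc_n : Int) (is_psi3 : Bool) : List (List Int) :=
  let base : Int := (if is_psi3 then 13001 else 12001) + n_parties * cyc_n
  let start : List Int := (PySem.List.pyRange 0 n_parties 1).map (fun a =>
    base + PySem.Int.floordiv (a * (2 * n_parties - a - 1)) 2)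
  (PySem.List.pyRange 0 n_parties 1).map (fun i =>
    (PySem.List.pyRange 0 n_parties 1).map (fun j =>
      if i = j then 0
      else if i < j then PySem.List.pyGetD start i 0 + j - i - 1
      else PySem.List.pyGetD start j 0 + i - j - 1))

-- ===== PRECONDITION & SPEC =====
def Spec_get_port_array (n_parties : Int) (cyc_n : Int) (is_psi3 : Bool) (out : List (List Int)) : Prop := out = get_port_array_alt n_parties cyc_n is_psi3
instance (n_parties : Int) (cyc_n : Int) (is_psi3 : Bool) (out : List (List Int)) : Decidable (Spec_get_port_array n_parties cyc_n is_psi3 out) := by unfold Spec_get_port_array; infer_instance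

-- ===== CLAIM (what is proved, stated in full; the proofs are below) =====
def Claim_equal_get_port_array : Prop := ∀ (n_parties : Int) (cyc_n : Int) (is_psi3 : Bool), Dom_get_port_array n_parties cyc_n is_psi3 → Spec_get_port_array n_parties cyc_n is_psi3 (get_port_array n_parties cyc_n is_psi3)

-- ===== LEMMAS AND PROOFS =====

-- value of cell (i, j) in the final matrix (Nat indices, n = matrix size)
def pvVal (n : Nat) (base : Int) (i j : Nat) : Int :=
  if i = j then 0 else
    base + PySem.Int.floordiv ((min i j : Nat) * (2 * (n : Int) - (min i j : Nat) - 1)) 2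
      + (((max i j : Nat) : Int) - ((min i j : Nat) : Int) - 1)

def pvRow (n : Nat) (base : Int) (i : Nat) : List Int :=
  (List.range n).map (fun j => pvVal n base i j)

-- A's counter value at the start of row i
def pvS (n : Nat) (base : Int) (i : Nat) : Int :=
  base + PySem.Int.floordiv ((i : Int) * (2 * (n : Int) - i - 1)) 2

-- A's matrix state after the first m rows are filled
def pvArr (n : Nat) (base : Int) (m : Nat) : List (List Int) :=
  (List.range n).map (fun k => if k < m then pvRow n base k else [])

lemma pvS_succ (n : Nat) (base : Int) (i : Nat) :
    pvS n base (i + 1) = pvS n base i + ((n : Int) - i - 1) := by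
  unfold pvS
  have key : ((i : Int) + 1) * (2 * (n : Int) - ((i : Int) + 1) - 1)
      = (i : Int) * (2 * (n : Int) - i - 1) + ((n : Int) - i - 1) * 2 := by ring
  rw [PySem.Int.floordiv_eq_ediv_of_pos (by norm_num),
      PySem.Int.floordiv_eq_ediv_of_pos (by norm_num)]
  push_cast
  rw [key, Int.add_mul_ediv_right _ _ (by norm_num)]
  ring

lemma pvVal_symm (n : Nat) (base : Int) (i j : Nat) :
    pvVal n base i j = pvVal n base j i := by
  simp [pvVal, min_comm i j, max_comm i j, eq_comm]

lemma pvVal_upper (n : Nat) (base : Int) (i j : Nat) (h : i < j) :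
    pvVal n base i j = pvS n base i + ((j : Int) - i - 1) := by
  unfold pvVal pvS
  rw [if_neg (by omega), min_eq_left h.le, max_eq_right h.le]

lemma set_map_range {α : Type} (f : Nat → α) (n i : Nat) (v : α) :
    (List.map f (List.range n)).set i v
      = (List.range n).map (fun k => if k = i then v else f k) := by
  apply List.ext_getElem
  · simp
  · intro k h1 h2
    simp only [List.getElem_set, List.getElem_map, List.getElem_range] at *
    by_cases hk : k = i
    · simp [hk]
    · simp [hk]
      intro h
      exact absurd h.symm hk

lemma inner_eq (n : Nat) (base : Int) (i : Nat) (hi : i < n) (m : Nat) (hm : m ≤ n) :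
    (List.map (fun k : Nat => (k : Int)) (List.range m)).foldl
      (fun (st2 : List Int × Int) (j : Int) =>
        if (i : Int) < j then (PySem.List.pySetD st2.1 j st2.2, st2.2 + 1)
        else if j < (i : Int) then
          (PySem.List.pySetD st2.1 j
            (PySem.List.pyGetD (PySem.List.pyGetD (pvArr n base i) j []) (i : Int) 0), st2.2)
        else st2)
      (List.replicate n (0 : Int), pvS n base i)
    = ((List.range n).map (fun j => if j < m then pvVal n base i j else 0),
       pvS n base i + ((m - (i + 1) : Nat) : Int)) := by
  induction m with
  | zero =>
    have h0 : (List.map (fun k : Nat => (k : Int)) (List.range 0)) = [] := by simp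
    rw [h0, List.foldl_nil]
    simp only [Prod.mk.injEq]
    refine ⟨?_, by omega⟩
    apply List.ext_getElem
    · simp
    · intro k h1 h2
      simp
  | succ m ih =>
    have hm' : m < n := hm
    have hsplit : (List.map (fun k : Nat => (k : Int)) (List.range (m + 1)))
        = List.map (fun k : Nat => (k : Int)) (List.range m) ++ [(m : Int)] := by
      rw [List.range_succ]; simp
    rw [hsplit, List.foldl_append, ih (le_of_lt hm')]
    simp only [List.foldl_cons, List.foldl_nil]
    rcases lt_trichotomy i m with him | him | him
    · -- column m is to the right of the diagonal: tmp[m] = counter; counter += 1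
      rw [if_pos (by exact_mod_cast him)]
      simp only [PySem.List.pySetD_natCast, Prod.mk.injEq]
      constructor
      · rw [set_map_range]
        apply List.map_congr_left
        intro j hj
        by_cases hjm : j = m
        · subst hjm
          rw [if_pos rfl, if_pos (Nat.lt_succ_self j), pvVal_upper n base i j him]
          have : i + 1 ≤ j := him
          omega
        · simp only [hjm, if_false]
          have : j < m ↔ j < m + 1 := by omega
          rw [if_congr this rfl rfl]
      · have : i + 1 ≤ m := him
        omega
    · -- the diagonal cell: nothing happens, tmp[m] stays 0
      subst him
      rw [if_neg (by omega), if_neg (by omega)]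
      simp only [Prod.mk.injEq]
      constructor
      · apply List.map_congr_left
        intro j hj
        by_cases hjm : j = i
        · subst hjm
          simp [pvVal]
        · have : j < i ↔ j < i + 1 := by omega
          rw [if_congr this rfl rfl]
      · omega
    · -- column m is left of the diagonal: mirror-read ports_array[m][i]
      rw [if_neg (by exact_mod_cast (by omega : ¬ (i : Int) < (m : Int))),
          if_pos (by exact_mod_cast him)]
      simp only [PySem.List.pySetD_natCast, PySem.List.pyGetD_natCast, Prod.mk.injEq]
      constructor
      · have harr : (pvArr n base i).getD m [] = pvRow n base m := by
          unfold pvArr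
          rw [List.getD_eq_getElem?_getD]
          simp [hm', him]
        rw [harr]
        have hrow : (pvRow n base m).getD i 0 = pvVal n base i m := by
          unfold pvRow
          rw [List.getD_eq_getElem?_getD]
          simp [hi]
          exact (pvVal_symm n base m i).symm ▸ pvVal_symm n base m i
        rw [hrow, set_map_range]
        apply List.map_congr_left
        intro j hj
        by_cases hjm : j = m
        · subst hjm
          rw [if_pos rfl, if_pos (Nat.lt_succ_self j)]
        · simp only [hjm, if_false]
          have : j < m ↔ j < m + 1 := by omega
          rw [if_congr this rfl rfl]
      · omega

lemma outer_eq (n : Nat) (base : Int) (m : Nat) (hm : m ≤ n) :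
    (List.map (fun k : Nat => (k : Int)) (List.range m)).foldl
      (fun (st : List (List Int) × Int) (i : Int) =>
        (PySem.List.pySetD st.1 i
          ((List.map (fun k : Nat => (k : Int)) (List.range n)).foldl
            (fun (st2 : List Int × Int) (j : Int) =>
              if i < j then (PySem.List.pySetD st2.1 j st2.2, st2.2 + 1)
              else if j < i then
                (PySem.List.pySetD st2.1 j
                  (PySem.List.pyGetD (PySem.List.pyGetD st.1 j []) i 0), st2.2)
              else st2)
            (List.replicate n (0 : Int), st.2)).1,
         ((List.map (fun k : Nat => (k : Int)) (List.range n)).foldl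
            (fun (st2 : List Int × Int) (j : Int) =>
              if i < j then (PySem.List.pySetD st2.1 j st2.2, st2.2 + 1)
              else if j < i then
                (PySem.List.pySetD st2.1 j
                  (PySem.List.pyGetD (PySem.List.pyGetD st.1 j []) i 0), st2.2)
              else st2)
            (List.replicate n (0 : Int), st.2)).2))
      (List.replicate n ([] : List Int), base)
    = (pvArr n base m, pvS n base m) := by
  induction m with
  | zero =>
    have h0 : (List.map (fun k : Nat => (k : Int)) (List.range 0)) = [] := by simp
    rw [h0, List.foldl_nil]
    simp only [Prod.mk.injEq]
    constructor
    · apply List.ext_getElem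
      · simp [pvArr]
      · intro k h1 h2
        simp [pvArr]
    · unfold pvS
      rw [PySem.Int.floordiv_eq_ediv_of_pos (by norm_num)]
      simp
  | succ m ih =>
    have hm' : m < n := hm
    have hsplit : (List.map (fun k : Nat => (k : Int)) (List.range (m + 1)))
        = List.map (fun k : Nat => (k : Int)) (List.range m) ++ [(m : Int)] := by
      rw [List.range_succ]; simp
    rw [hsplit, List.foldl_append, ih (le_of_lt hm')]
    simp only [List.foldl_cons, List.foldl_nil]
    rw [inner_eq n base m hm' n le_rfl]
    simp only [PySem.List.pySetD_natCast, Prod.mk.injEq]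
    constructor
    · unfold pvArr
      rw [set_map_range]
      apply List.map_congr_left
      intro k hk
      by_cases hkm : k = m
      · subst hkm
        rw [if_pos rfl, if_pos (Nat.lt_succ_self k)]
        unfold pvRow
        apply List.map_congr_left
        intro j hj
        rw [if_pos (List.mem_range.mp hj)]
      · simp only [hkm, if_false]
        have : k < m ↔ k < m + 1 := by omega
        rw [if_congr this rfl rfl]
    · rw [pvS_succ n base m]
      omega

-- ===== VERDICT (by name: the statement is the Claim_ definition above) =====
theorem get_port_array_spec : Claim_equal_get_port_array := by
  intro N cyc psi _
  simp only [Spec_get_port_array, get_port_array, get_port_array_alt]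
  by_cases hN : N ≤ 0
  · rw [PySem.List.pyRange_one_eq_nil hN]
    simp [PySem.List.pyRepeat_singleton, Int.toNat_of_nonpos hN]
  · rw [not_le] at hN
    obtain ⟨n, rfl⟩ : ∃ n : Nat, N = (n : Int) := ⟨N.toNat, (Int.toNat_of_nonneg hN.le).symm⟩
    rw [PySem.List.pyRange_zero_natCast, PySem.List.pyRepeat_singleton,
        PySem.List.pyRepeat_singleton]
    simp only [Int.toNat_natCast]
    rw [outer_eq n ((if psi then (13001 : Int) else 12001) + (n : Int) * cyc) n le_rfl]
    unfold pvArr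
    dsimp only
    rw [List.map_map]
    apply List.map_congr_left
    intro k hk
    replace hk := List.mem_range.mp hk
    simp only [Function.comp, if_pos hk]
    unfold pvRow
    rw [List.map_map]
    apply List.map_congr_left
    intro j hj
    replace hj := List.mem_range.mp hj
    simp only [Function.comp]
    have hstart : ∀ a : Nat, a < n →
        PySem.List.pyGetD
          (List.map
            (fun x => (if psi = true then (13001 : Int) else 12001) + (n : Int) * cyc
              + PySem.Int.floordiv (x * (2 * (n : Int) - x - 1)) 2)
            (List.map (fun k : Nat => (k : Int)) (List.range n))) (a : Int) 0
        = pvS n ((if psi = true then (13001 : Int) else 12001) + (n : Int) * cyc) a := by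
      intro a ha
      rw [List.map_map, PySem.List.pyGetD_natCast, List.getD_eq_getElem?_getD]
      simp only [List.getElem?_map, List.getElem?_range, ha]
      rfl
    by_cases hkj : k = j
    · simp [hkj, pvVal]
    · rw [if_neg (show ¬ ((k : Int) = (j : Int)) by exact_mod_cast hkj)]
      rcases lt_or_gt_of_ne hkj with h | h
      · have hI : (k : Int) < (j : Int) := by exact_mod_cast h
        rw [if_pos hI, hstart k hk, pvVal_upper n _ k j h]
        ring
      · have hI : ¬ (k : Int) < (j : Int) := by exact_mod_cast not_lt.mpr h.le
        rw [if_neg hI, hstart j hj, pvVal_symm, pvVal_upper n _ j k h]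
        ring
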